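-- pv_equiv track=rewrite | github.com/nyghtly-derek/advent-of-py | 09/streamproc.py | remove_canceled
-- ===== SOURCE A (Python) =====
-- def remove_canceled(stream):
--     new_stream = ""
--     i = 0
--     while i < len(stream):
--         char = stream[i]
--         if char == '!':
--             i += 1
--         else:
--             new_stream += char
--         i += 1
--     return new_stream
-- ===== SOURCE B (Python) =====
-- def remove_canceled(stream):
--     # One pass tracking the length of the current run of '!' characters:
--     # '!' is never emitted; a normal char ends the run and survives iff
--     # an even number of bangs immediately precede it.
--     out = []
--     run = 0
--     for c in stream:
--         if c == '!':
--             run += 1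
--         else:
--             if run % 2 == 0:
--                 out.append(c)
--             run = 0
--     return ''.join(out)
-- ===== Notes on version B (the rewrite author's own statement) =====
-- stated objective: faster
-- what changed: Replaced the index-jumping skip-next-char state machine that grows the result by repeated string concatenation with a single pass that counts the run of consecutive bangs, keeps a normal character iff an even number of bangs immediately precede it, and joins the collected characters once at the end.
import Mathlib
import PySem

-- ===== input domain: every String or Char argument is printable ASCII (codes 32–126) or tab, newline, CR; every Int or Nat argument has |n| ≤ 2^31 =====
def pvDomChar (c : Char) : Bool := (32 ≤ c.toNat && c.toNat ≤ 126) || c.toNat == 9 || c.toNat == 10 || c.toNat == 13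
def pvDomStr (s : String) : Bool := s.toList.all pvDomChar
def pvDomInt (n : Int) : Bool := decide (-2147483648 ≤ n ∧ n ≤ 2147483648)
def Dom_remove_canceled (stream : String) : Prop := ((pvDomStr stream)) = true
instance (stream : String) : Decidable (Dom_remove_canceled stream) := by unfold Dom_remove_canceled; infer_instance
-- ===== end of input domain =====

-- B replaces A's skip-next-char index loop (with quadratic string +=) by a one-pass bang-run-parity scan joining the output once (faster).

-- ===== PORT A =====
-- A's while loop over index i: at '!' it does i += 1 (skip next char) and the
-- trailing i += 1 of every iteration; ported as recursion on the remaining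
-- characters with the accumulated output (new_stream) as a List Char.
def pvAGo : List Char → List Char → List Char
  | [], acc => acc
  | c :: rest, acc =>
      if c = '!' then
        -- i += 2: drop the next character too (rest.tail)
        match rest with
        | [] => acc
        | _ :: r => pvAGo r acc
      else pvAGo rest (acc ++ [c])           -- new_stream += char

def remove_canceled (stream : String) : String :=
  String.ofList (pvAGo stream.toList [])

-- ===== PORT B =====
-- B's for loop: out is the collected characters, run the length of the current
-- run of '!' immediately before the current position.
def pvBGo : List Char → List Char → Nat → List Char
  | [], out, _ => out
  | c :: rest, out, run =>
      if c = '!' then pvBGo rest out (run + 1)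
      else pvBGo rest (if run % 2 = 0 then out ++ [c] else out) 0

def remove_canceled_alt (stream : String) : String :=
  String.ofList (pvBGo stream.toList [] 0)

-- ===== PRECONDITION & SPEC =====
def Spec_remove_canceled (stream : String) (out : String) : Prop := out = remove_canceled_alt stream
instance (stream : String) (out : String) : Decidable (Spec_remove_canceled stream out) := by unfold Spec_remove_canceled; infer_instance

-- ===== CLAIM (what is proved, stated in full; the proofs are below) =====
def Claim_equal_remove_canceled : Prop := ∀ (stream : String), Dom_remove_canceled stream → Spec_remove_canceled stream (remove_canceled stream)

-- ===== LEMMAS AND PROOFS =====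

-- B's state only matters through the parity of run.
theorem pvBGo_parity (l : List Char) : ∀ out r, pvBGo l out (r + 2) = pvBGo l out r := by
  induction l with
  | nil => intro out r; rfl
  | cons c rest ih =>
      intro out r
      by_cases h : c = '!'
      · simp only [pvBGo, h, if_pos]
        have h3 : r + 2 + 1 = (r + 1) + 2 := by omega
        rw [h3, ih out (r + 1)]
      · simp only [pvBGo, h, if_false, Nat.add_mod_right]

theorem pvAGo_eq_pvBGo : ∀ (n : Nat) (l : List Char), l.length ≤ n → ∀ acc, pvAGo l acc = pvBGo l acc 0 := by
  intro n
  induction n with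
  | zero =>
      intro l hl acc
      have : l = [] := List.eq_nil_of_length_eq_zero (Nat.le_zero.mp hl)
      subst this; rfl
  | succ n ih =>
      intro l hl acc
      cases l with
      | nil => rfl
      | cons c rest =>
          by_cases hc : c = '!'
          · subst hc
            cases rest with
            | nil => rfl
            | cons d r =>
                have ha : pvAGo ('!' :: d :: r) acc = pvAGo r acc := by simp [pvAGo]
                have hb : pvBGo ('!' :: d :: r) acc 0 = pvBGo (d :: r) acc 1 := by simp [pvBGo]
                rw [ha, hb]
                have hr : r.length ≤ n := by simp at hl; omega
                by_cases hd : d = '!'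
                · have hb2 : pvBGo (d :: r) acc 1 = pvBGo r acc 2 := by simp [pvBGo, hd]
                  rw [hb2, show (2:Nat) = 0 + 2 by rfl, pvBGo_parity]
                  exact ih r hr acc
                · have hb2 : pvBGo (d :: r) acc 1 = pvBGo r acc 0 := by
                    rw [pvBGo]
                    simp [hd]
                  rw [hb2]
                  exact ih r hr acc
          · have ha : pvAGo (c :: rest) acc = pvAGo rest (acc ++ [c]) := by
              rw [pvAGo.eq_def]; simp only []; rw [if_neg hc]
            have hb : pvBGo (c :: rest) acc 0 = pvBGo rest (acc ++ [c]) 0 := by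
              rw [pvBGo, if_neg hc, if_pos (by decide : (0:Nat) % 2 = 0)]
            rw [ha, hb]
            exact ih rest (by simp at hl; omega) (acc ++ [c])

-- ===== VERDICT (by name: the statement is the Claim_ definition above) =====
theorem remove_canceled_spec : Claim_equal_remove_canceled := by
  intro stream _
  unfold Spec_remove_canceled remove_canceled remove_canceled_alt
  exact congrArg String.ofList (pvAGo_eq_pvBGo stream.toList.length stream.toList le_rfl [])
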